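-- pv_equiv track=rewrite | github.com/NatesVibeCode/Praxis | Code&DBs/Workflow/runtime/operating_model_planner.py | _unique_label
-- ===== SOURCE A (Python) =====
-- def _unique_label(base: str, used_labels: set[str]) -> str:
--     candidate = base or "step"
--     if candidate not in used_labels:
--         used_labels.add(candidate)
--         return candidate
--     index = 2
--     while f"{candidate}-{index}" in used_labels:
--         index += 1
--     resolved = f"{candidate}-{index}"
--     used_labels.add(resolved)
--     return resolved
-- ===== SOURCE B (Python) =====
-- def _unique_label(base: str, used_labels: set[str]) -> str:
--     candidate = base or "step"
--     if candidate not in used_labels: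
--         used_labels.add(candidate)
--         return candidate
--     # Mark-and-scan: index the bounded candidate range once, mark which slots
--     # are taken in a single pass over used_labels, then scan for the first gap.
--     n = len(used_labels)
--     slots = {f"{candidate}-{i}": i for i in range(2, n + 3)}
--     taken = [False] * (n + 3)
--     for label in used_labels:
--         i = slots.get(label)
--         if i is not None:
--             taken[i] = True
--     k = 2
--     while taken[k]:
--         k += 1
--     resolved = f"{candidate}-{k}"
--     used_labels.add(resolved)
--     return resolved
-- ===== Notes on version B (the rewrite author's own statement) =====
-- stated objective: alternative
-- what changed: Replaces A's probe-until-free loop of repeated set-membership tests on freshly built strings by a mark-and-scan mex: build a candidate->index table for the bounded range 2..len(used)+2, mark taken slots in one pass over used_labels into a boolean array, then scan the array for the first gap.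
import Mathlib
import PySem

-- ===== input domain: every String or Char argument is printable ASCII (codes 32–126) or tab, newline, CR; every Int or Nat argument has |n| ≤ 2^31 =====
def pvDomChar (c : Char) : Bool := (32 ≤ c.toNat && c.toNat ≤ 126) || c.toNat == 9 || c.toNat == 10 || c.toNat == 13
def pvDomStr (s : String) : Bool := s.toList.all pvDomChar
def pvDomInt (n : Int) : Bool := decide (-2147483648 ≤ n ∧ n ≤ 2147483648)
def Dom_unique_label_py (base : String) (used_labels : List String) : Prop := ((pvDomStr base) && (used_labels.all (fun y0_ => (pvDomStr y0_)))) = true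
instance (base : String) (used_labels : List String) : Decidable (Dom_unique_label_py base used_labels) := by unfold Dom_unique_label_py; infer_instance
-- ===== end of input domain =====

-- B replaces A's probe-until-free membership loop by a mark-and-scan: a candidate->index
-- table for the bounded range, one marking pass over used_labels into a boolean array,
-- then a scan for the first gap; equivalence is about the RETURN value — both Pythons
-- add the returned label to used_labels identically (mutation not modelled here).


-- ===== PORT A =====
-- candidate = base or "step" (empty string is the only falsy str)
def orStep (base : String) : String := if base = "" then "step" else base

-- f"{candidate}-{index}"
def candLbl (c : String) (i : Nat) : String := c ++ "-" ++ PySem.Int.toStr (i : Int)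

-- while f"{candidate}-{index}" in used_labels: index += 1
-- Totalized with fuel used_labels.length + 1; Python's loop always exits within that many
-- steps (pigeonhole over distinct candidates), so the fuel-0 branch is unreachable in Python.
def uniqueLoopA (c : String) (used : List String) (i : Nat) (fuel : Nat) : String :=
  match fuel with
  | 0 => candLbl c i    -- totalization artifact, never reached in Python
  | f + 1 =>
      if used.contains (candLbl c i) then
        uniqueLoopA c used (i + 1) f
      else
        candLbl c i

def unique_label_py (base : String) (used_labels : List String) : String :=
  if !used_labels.contains (orStep base) then
    orStep base                                               -- early return (set.add not modelled)
  else
    uniqueLoopA (orStep base) used_labels 2 (used_labels.length + 1)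

-- ===== PORT B =====
-- slots = {f"{c}-{i}": i for i in range(2, n + 3)}
def slotsB (c : String) (n : Nat) : PySem.Dict String Nat :=
  (List.range' 2 (n + 1)).foldl (fun d i => d.insert (candLbl c i) i) PySem.Dict.empty

-- for label in used_labels: i = slots.get(label); if i is not None: taken[i] = True
-- (every stored index is < len(taken), so List.set is exactly Python's taken[i] = True;
-- iterating the set here is order-independent: only which slots get marked matters)
def markB (slots : PySem.Dict String Nat) (used : List String) (taken : List Bool) : List Bool :=
  used.foldl (fun acc lbl =>
    match slots.get? lbl with
    | some i => acc.set i true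
    | none => acc) taken

-- k = 2; while taken[k]: k += 1
-- Totalized with fuel len(taken); Python's scan always stops at an unmarked slot before
-- the end of the array, so the fuel-0 branch is unreachable in Python.
def scanB (taken : List Bool) (fuel : Nat) (k : Nat) : Nat :=
  match fuel with
  | 0 => k    -- totalization artifact, never reached in Python
  | f + 1 => if taken.getD k false then scanB taken f (k + 1) else k

def unique_label_py_alt (base : String) (used_labels : List String) : String :=
  if !used_labels.contains (orStep base) then
    orStep base                                               -- early return (set.add not modelled)
  else
    let c := orStep base
    let n := used_labels.length
    let taken := markB (slotsB c n) used_labels (List.replicate (n + 3) false)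
    candLbl c (scanB taken taken.length 2)

-- ===== PRECONDITION & SPEC =====
def Spec_unique_label_py (base : String) (used_labels : List String) (out : String) : Prop := out = unique_label_py_alt base used_labels
instance (base : String) (used_labels : List String) (out : String) : Decidable (Spec_unique_label_py base used_labels out) := by unfold Spec_unique_label_py; infer_instance

-- ===== CLAIM (what is proved, stated in full; the proofs are below) =====
def Claim_equal_unique_label_py : Prop := ∀ (base : String) (used_labels : List String), Dom_unique_label_py base used_labels → Spec_unique_label_py base used_labels (unique_label_py base used_labels)

-- ===== LEMMAS AND PROOFS =====

-- A's index loop, on the index alone.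
def firstFree (used : List String) (c : String) (k : Nat) (fuel : Nat) : Nat :=
  match fuel with
  | 0 => k
  | f + 1 => if used.contains (candLbl c k) then firstFree used c (k + 1) f else k

theorem uniqueLoopA_eq_firstFree (c : String) (used : List String) :
    ∀ (fuel i : Nat), uniqueLoopA c used i fuel = candLbl c (firstFree used c i fuel) := by
  intro fuel
  induction fuel with
  | zero => intro i; simp [uniqueLoopA, firstFree]
  | succ f ih =>
      intro i
      rw [uniqueLoopA, firstFree]
      split_ifs with h <;> simp [ih]

-- str(n) of distinct positive naturals differ: Nat.toDigits 10 is injective on positives.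
theorem toDigitsCore_acc (f : Nat) :
    ∀ (n : Nat) (l : List Char), Nat.toDigitsCore 10 f n l = Nat.toDigitsCore 10 f n [] ++ l := by
  induction f with
  | zero => intro n l; simp [Nat.toDigitsCore]
  | succ f ih =>
      intro n l
      simp only [Nat.toDigitsCore]
      split_ifs with h
      · simp
      · rw [ih (n / 10) _, ih (n / 10) [(n % 10).digitChar]]
        simp

theorem toDigitsCore_eq_digits (f : Nat) :
    ∀ (n : Nat), 0 < n → n ≤ f →
      Nat.toDigitsCore 10 f n [] = ((Nat.digits 10 n).map Nat.digitChar).reverse := by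
  induction f with
  | zero => intro n h1 h2; omega
  | succ f ih =>
      intro n h1 h2
      rw [Nat.digits_def' (by norm_num) h1]
      simp only [Nat.toDigitsCore, List.map_cons, List.reverse_cons]
      split_ifs with h
      · simp [h, Nat.digits_zero]
      · rw [toDigitsCore_acc, ih (n / 10) (Nat.pos_of_ne_zero h) (by omega)]

theorem digitChar_inj (a b : Nat) (ha : a < 10) (hb : b < 10) (h : a.digitChar = b.digitChar) : a = b := by
  interval_cases a <;> interval_cases b <;> simp_all [Nat.digitChar]

theorem map_digitChar_inj :
    ∀ (l1 l2 : List Nat), (∀ d ∈ l1, d < 10) → (∀ d ∈ l2, d < 10) →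
      l1.map Nat.digitChar = l2.map Nat.digitChar → l1 = l2 := by
  intro l1
  induction l1 with
  | nil => intro l2 _ _ h; cases l2 <;> simp_all
  | cons a t ih =>
      intro l2 h1 h2 h
      cases l2 with
      | nil => simp_all
      | cons b t2 =>
          simp only [List.map_cons, List.cons.injEq] at h
          have := digitChar_inj a b (h1 a (by simp)) (h2 b (by simp)) h.1
          have := ih t2 (fun d hd => h1 d (by simp [hd])) (fun d hd => h2 d (by simp [hd])) h.2
          simp_all

theorem toStr_inj_pos (i j : Nat) (hi : 0 < i) (hj : 0 < j)
    (h : PySem.Int.toStr (i : Int) = PySem.Int.toStr (j : Int)) : i = j := by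
  have h' := congrArg String.toList h
  simp only [PySem.Int.toStr, String.toList_ofList] at h'
  simp only [PySem.Int.toChars] at h'
  rw [if_neg (by omega), if_neg (by omega)] at h'
  simp only [Int.toNat_natCast] at h'
  unfold Nat.toDigits at h'
  rw [toDigitsCore_eq_digits _ i hi (by omega), toDigitsCore_eq_digits _ j hj (by omega)] at h'
  have := map_digitChar_inj (Nat.digits 10 i) (Nat.digits 10 j)
    (fun d hd => Nat.digits_lt_base (by norm_num) hd)
    (fun d hd => Nat.digits_lt_base (by norm_num) hd)
    (List.reverse_injective h')
  exact Nat.digits.injective 10 this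

theorem candLbl_inj_pos (c : String) (i j : Nat) (hi : 0 < i) (hj : 0 < j)
    (h : candLbl c i = candLbl c j) : i = j := by
  apply toStr_inj_pos i j hi hj
  have h' := congrArg String.toList h
  simp only [candLbl, String.toList_append] at h'
  exact String.toList_inj.mp (List.append_cancel_left h')

-- slots characterization: get? slotsB = some i iff i is in range and the key is candLbl c i.
theorem slotsB_items (c : String) (n : Nat) :
    (slotsB c n).items = (List.range' 2 (n + 1)).map (fun i => (candLbl c i, i)) := by
  unfold slotsB
  rw [PySem.Dict.items_foldl_insert_fresh (List.range' 2 (n + 1)) (fun i => candLbl c i) (fun i => i)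
    PySem.Dict.empty
    (by intro a _; simp [PySem.Dict.contains, PySem.Dict.empty])
    (by
      apply List.Nodup.map_on
      · intro x hx y hy hxy
        exact candLbl_inj_pos c x y (by simp [List.mem_range'_1] at hx; omega)
          (by simp [List.mem_range'_1] at hy; omega) hxy
      · exact List.nodup_range' 1)]
  simp [PySem.Dict.empty]

theorem slotsB_keys_nodup (c : String) (n : Nat) : (slotsB c n).keys.Nodup := by
  unfold slotsB
  exact PySem.Dict.nodup_keys_foldl_insert_key (List.range' 2 (n + 1)) (fun i => candLbl c i)
    (fun _ i => i) PySem.Dict.empty (by rw [PySem.Dict.keys_empty]; exact List.nodup_nil)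

theorem slotsB_get? (c : String) (n : Nat) (lbl : String) (i : Nat) :
    (slotsB c n).get? lbl = some i ↔ (2 ≤ i ∧ i < n + 3 ∧ lbl = candLbl c i) := by
  rw [PySem.Dict.get?_eq_some_iff_mem_items _ _ _ (slotsB_keys_nodup c n), slotsB_items]
  simp only [List.mem_map, List.mem_range'_1, Prod.mk.injEq]
  constructor
  · rintro ⟨j, ⟨hj1, hj2⟩, hl, hv⟩
    subst hv
    exact ⟨hj1, by omega, hl.symm⟩
  · rintro ⟨h1, h2, hl⟩
    exact ⟨i, ⟨h1, by omega⟩, hl.symm, rfl⟩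

-- the marking fold, one slot at a time
theorem markB_getD (slots : PySem.Dict String Nat) (used : List String) :
    ∀ (acc : List Bool) (j : Nat),
      (∀ lbl ∈ used, ∀ i, slots.get? lbl = some i → i < acc.length) →
      (markB slots used acc).getD j false
        = (acc.getD j false || used.any (fun lbl => slots.get? lbl == some j)) := by
  induction used with
  | nil => intro acc j _; simp [markB]
  | cons lbl t ih =>
      intro acc j hb
      simp only [markB, List.foldl_cons, List.any_cons]
      cases h : slots.get? lbl with
      | none =>
          rw [show (t.foldl (fun acc lbl => match slots.get? lbl with
                | some i => acc.set i true | none => acc) acc) = markB slots t acc from rfl,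
            ih acc j (fun l hl i hi => hb l (by simp [hl]) i hi)]
          simp
      | some i =>
          rw [show (t.foldl (fun acc lbl => match slots.get? lbl with
                | some i => acc.set i true | none => acc) (acc.set i true)) = markB slots t (acc.set i true) from rfl,
            ih (acc.set i true) j (by simpa using fun l hl i' hi' => hb l (by simp [hl]) i' hi')]
          by_cases hij : i = j
          · subst hij
            have hlen : i < acc.length := hb lbl (by simp) i h
            rw [List.getD_eq_getElem?_getD, List.getElem?_set_self hlen]
            simp
          · rw [List.getD_eq_getElem?_getD, List.getElem?_set_ne hij, ← List.getD_eq_getElem?_getD]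
            have : (some i == some j) = false := by simp [hij]
            simp [this]

theorem taken_getD (c : String) (used : List String) (j : Nat) :
    (markB (slotsB c used.length) used (List.replicate (used.length + 3) false)).getD j false
      = ((decide (2 ≤ j) && decide (j < used.length + 3)) && used.contains (candLbl c j)) := by
  rw [markB_getD (slotsB c used.length) used (List.replicate (used.length + 3) false) j
    (by
      intro lbl _ i hi
      rw [slotsB_get?] at hi
      simp only [List.length_replicate]
      omega)]
  have hrep : (List.replicate (used.length + 3) false).getD j false = false := by
    rw [List.getD_eq_getElem?_getD]
    rcases Nat.lt_or_ge j (used.length + 3) with h | h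
    · simp
    · rw [List.getElem?_eq_none (by simpa using h)]; rfl
  rw [hrep, Bool.false_or]
  have hpt : ∀ lbl : String, ((slotsB c used.length).get? lbl == some j)
      = ((decide (2 ≤ j) && decide (j < used.length + 3)) && (lbl == candLbl c j)) := by
    intro lbl
    rw [Bool.eq_iff_iff]
    simp only [beq_iff_eq, Bool.and_eq_true, decide_eq_true_eq]
    rw [slotsB_get?]
    tauto
  simp only [hpt]
  cases hC : (decide (2 ≤ j) && decide (j < used.length + 3)) <;>
    simp [List.any_beq']

-- B's scan agrees with A's probe loop given the taken-array characterization.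
theorem scanB_eq_firstFree (c : String) (used : List String) (taken : List Bool)
    (H : ∀ j, taken.getD j false = ((decide (2 ≤ j) && decide (j < used.length + 3)) && used.contains (candLbl c j))) :
    ∀ (f1 : Nat) (f2 : Nat) (k : Nat), 2 ≤ k → k + f1 = used.length + 3 → f1 ≤ f2 →
      scanB taken f2 k = firstFree used c k f1 := by
  intro f1
  induction f1 with
  | zero =>
      intro f2 k _ hk _
      cases f2 with
      | zero => rfl
      | succ f =>
          rw [scanB, H k]
          simp only [show decide (k < used.length + 3) = false by simp; omega,
            Bool.and_false, Bool.false_and, Bool.false_eq_true, if_false]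
          rfl
  | succ f ih =>
      intro f2 k hk2 hk hle
      cases f2 with
      | zero => omega
      | succ f2' =>
          rw [scanB, firstFree, H k]
          simp only [show decide (2 ≤ k) = true by simp; omega,
            show decide (k < used.length + 3) = true by simp; omega, Bool.true_and]
          cases hc : used.contains (candLbl c k) with
          | true => simpa using ih f2' (k + 1) (by omega) (by omega) (by omega)
          | false => simp


theorem markB_length (slots : PySem.Dict String Nat) (used : List String) :
    ∀ (acc : List Bool), (markB slots used acc).length = acc.length := by
  induction used with
  | nil => intro acc; simp [markB]
  | cons lbl t ih =>
      intro acc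
      simp only [markB, List.foldl_cons]
      cases h : slots.get? lbl with
      | none => exact ih acc
      | some i => exact (ih (acc.set i true)).trans (by simp)

theorem unique_label_py_spec : Claim_equal_unique_label_py := by
  intro base used _
  unfold Spec_unique_label_py unique_label_py unique_label_py_alt
  cases h : used.contains (orStep base) with
  | false => simp
  | true =>
      simp only [Bool.not_true, Bool.false_eq_true, if_false]
      rw [uniqueLoopA_eq_firstFree]
      have hlen : (markB (slotsB (orStep base) used.length) used (List.replicate (used.length + 3) false)).length = used.length + 3 := by
        rw [markB_length]; simp
      rw [hlen]
      congr 1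
      exact (scanB_eq_firstFree (orStep base) used _
        (taken_getD (orStep base) used) (used.length + 1) (used.length + 3) 2 (by omega) (by omega) (by omega)).symm
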